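-- pv_equiv track=rewrite | github.com/samkaj/alys | alys/lexer.py | is_list_item
-- ===== SOURCE A (Python) =====
-- def is_list_item(line: str) -> bool:
--     line = line.lstrip()
--     if line.startswith("- ") or line.startswith("* "):
--         return True
--
--     ordered = line.split(".")
--     if len(ordered) < 2:
--         return False
--
--     for c in ordered[0]:
--         if c not in "1234567890":
--             return False
--
--     return ordered[1].startswith(" ")
-- ===== SOURCE B (Python) =====
-- def is_list_item(line: str) -> bool:
--     s = line.lstrip()
--     if s[:2] in ("- ", "* "):
--         return True
--     i = 0
--     while i < len(s) and s[i] in "0123456789":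
--         i += 1
--     return s[i:i + 2] == ". "
-- ===== Notes on version B (the rewrite author's own statement) =====
-- stated objective: simpler
-- what changed: Replaces the split-on-dot pass plus per-part digit loop and prefix test with a single left-to-right scan that skips leading digits and compares the next two characters with dot-then-space.
import Mathlib
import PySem

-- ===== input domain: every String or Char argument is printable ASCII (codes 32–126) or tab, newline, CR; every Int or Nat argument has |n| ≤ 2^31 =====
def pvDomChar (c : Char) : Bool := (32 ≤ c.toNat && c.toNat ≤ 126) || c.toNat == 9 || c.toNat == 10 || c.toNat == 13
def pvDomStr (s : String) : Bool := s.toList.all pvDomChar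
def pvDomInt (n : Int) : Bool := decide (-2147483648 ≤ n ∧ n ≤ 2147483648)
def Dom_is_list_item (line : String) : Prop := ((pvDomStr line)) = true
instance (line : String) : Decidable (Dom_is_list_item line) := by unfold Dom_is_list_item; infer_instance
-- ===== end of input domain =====

-- B replaces A's split-on-dot pass plus per-part checks by one direct scan (skip leading digits, compare the next two chars with dot-then-space); simpler, same cost.

-- ===== PORT A =====
def is_list_item (line : String) : Bool :=
  let s := PySem.Str.lstrip line
  if PySem.Str.startswith s "- " || PySem.Str.startswith s "* " then
    true
  else
    match PySem.Chars.splitOn s.toList ['.'] with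
    | p0 :: p1 :: _ =>
        (p0.all fun c => "1234567890".toList.contains c) && PySem.Chars.startswith p1 [' ']
    | _ => false   -- len(ordered) < 2

-- ===== PORT B =====
def is_list_item_alt (line : String) : Bool :=
  let s := (PySem.Str.lstrip line).toList
  if s.take 2 == ['-', ' '] || s.take 2 == ['*', ' '] then
    true
  else
    (s.dropWhile (fun c => "0123456789".toList.contains c)).take 2 == ['.', ' ']

-- ===== PRECONDITION & SPEC =====
def Spec_is_list_item (line : String) (out : Bool) : Prop := out = is_list_item_alt line
instance (line : String) (out : Bool) : Decidable (Spec_is_list_item line out) := by unfold Spec_is_list_item; infer_instance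

-- ===== CLAIM (what is proved, stated in full; the proofs are below) =====
def Claim_equal_is_list_item : Prop := ∀ (line : String), Dom_is_list_item line → Spec_is_list_item line (is_list_item line)

-- ===== LEMMAS AND PROOFS =====

-- the two digit alphabets test the same characters
theorem digitA_eq_digitB :
    (fun c => "0123456789".toList.contains c) = (fun c => "1234567890".toList.contains c) := by
  funext c
  have h1 : "0123456789".toList = ['0','1','2','3','4','5','6','7','8','9'] := by decide
  have h2 : "1234567890".toList = ['1','2','3','4','5','6','7','8','9','0'] := by decide
  rw [h1, h2]
  simp only [List.contains_eq_mem, decide_eq_decide, List.mem_cons, List.not_mem_nil, or_false]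
  tauto

-- the head of dropWhile fails the predicate
theorem head_dropWhile {α} (p : α → Bool) (l : List α) (c : α) (r : List α)
    (h : l.dropWhile p = c :: r) : p c = false := by
  induction l with
  | nil => simp at h
  | cons a as ih =>
    rw [List.dropWhile_cons] at h
    by_cases hp : p a = true
    · exact ih (by simpa [hp] using h)
    · simp [hp] at h
      simp [h.1 ▸ (by simpa using hp : p a = false)]

-- PySem.Chars.splitOn.go with a single-character separator, characterised fuel-free
theorem go_single (d : Char) : ∀ (fuel : Nat) (l cur : List Char) (acc : List (List Char)),
    l.length < fuel →
    PySem.Chars.splitOn.go [d] fuel l cur acc =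
      acc.reverse ++ ((cur.reverse ++ l.takeWhile (· ≠ d)) ::
        (match l.dropWhile (· ≠ d) with
         | [] => []
         | _ :: rest => PySem.Chars.splitOn rest [d])) := by
  intro fuel
  induction fuel using Nat.strong_induction_on with
  | _ fuel ih =>
    intro l cur acc h
    cases fuel with
    | zero => omega
    | succ fuel =>
      cases l with
      | nil =>
        rw [PySem.Chars.splitOn.go.eq_2 [d] (fuel + 1) cur acc (by omega)]
        simp
      | cons c rest =>
        rw [show fuel + 1 = Nat.succ fuel from rfl, PySem.Chars.splitOn.go.eq_3]
        have hlen : rest.length < fuel := by simp at h; omega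
        by_cases hc : d = c
        · subst hc
          have hpre : List.isPrefixOf [d] (d :: rest) = true := by simp [List.isPrefixOf]
          rw [hpre, if_pos rfl]
          simp only [List.length_singleton, List.drop_succ_cons, List.drop_zero]
          rw [ih fuel (by omega) rest [] (cur.reverse :: acc) hlen]
          have hs : PySem.Chars.splitOn rest [d] =
              (rest.takeWhile (· ≠ d)) ::
                (match rest.dropWhile (· ≠ d) with
                 | [] => []
                 | _ :: r => PySem.Chars.splitOn r [d]) := by
            unfold PySem.Chars.splitOn
            rw [ih (rest.length + 1) (by omega) rest [] [] (by omega)]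
            simp
            cases List.dropWhile (fun x => !decide (x = d)) rest <;> rfl
          simp [hs]
        · have hpre : List.isPrefixOf [d] (c :: rest) = false := by
            simp [List.isPrefixOf, hc]
          rw [hpre, if_neg (by simp)]
          rw [ih fuel (by omega) rest (c :: cur) acc hlen]
          have hcd : c ≠ d := fun h' => hc h'.symm
          simp [hcd]

theorem splitOn_single (d : Char) (cs : List Char) :
    PySem.Chars.splitOn cs [d] =
      (cs.takeWhile (· ≠ d)) ::
        (match cs.dropWhile (· ≠ d) with
         | [] => []
         | _ :: rest => PySem.Chars.splitOn rest [d]) := by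
  unfold PySem.Chars.splitOn
  rw [go_single d (cs.length + 1) cs [] [] (by omega)]
  simp
  cases List.dropWhile (fun x => !decide (x = d)) cs <;> rfl

-- core: A's split-based check equals B's direct scan
theorem core_eq (cs : List Char) :
    (match PySem.Chars.splitOn cs ['.'] with
     | p0 :: p1 :: _ =>
         (p0.all fun c => "1234567890".toList.contains c) && PySem.Chars.startswith p1 [' ']
     | _ => false)
    = ((cs.dropWhile (fun c => "0123456789".toList.contains c)).take 2 == ['.', ' ']) := by
  rw [digitA_eq_digitB, splitOn_single]
  cases hdw : cs.dropWhile (· ≠ '.') with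
  | nil =>
    dsimp only
    have hnod : ∀ x ∈ cs, x ≠ '.' := by
      intro x hx
      simpa using List.dropWhile_eq_nil_iff.mp hdw x hx
    symm
    rw [beq_eq_false_iff_ne]
    · intro heq
      have hmem : '.' ∈ (cs.dropWhile fun c => "1234567890".toList.contains c).take 2 := by
        rw [heq]; simp
      exact hnod '.' ((List.dropWhile_sublist _).subset (List.mem_of_mem_take hmem)) rfl
  | cons c0 rest =>
    have hc0 : c0 = '.' := by simpa using head_dropWhile _ cs c0 rest hdw
    subst hc0
    dsimp only
    rw [splitOn_single '.' rest]
    dsimp only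
    have hcs : cs = cs.takeWhile (· ≠ '.') ++ '.' :: rest := by
      conv_lhs => rw [← List.takeWhile_append_dropWhile (p := (· ≠ '.')) (l := cs)]
      rw [hdw]
    by_cases hall : (cs.takeWhile (· ≠ '.')).all (fun c => "1234567890".toList.contains c) = true
    · have hdt : (cs.takeWhile (· ≠ '.')).dropWhile (fun c => "1234567890".toList.contains c) = [] :=
        List.dropWhile_eq_nil_iff.mpr (fun x hx => List.all_eq_true.mp hall x hx)
      have hrd : cs.dropWhile (fun c => "1234567890".toList.contains c) = '.' :: rest := by
        conv_lhs => rw [hcs]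
        rw [List.dropWhile_append, hdt]
        simp
      rw [hrd]
      simp only [hall, Bool.true_and]
      cases rest with
      | nil => simp [PySem.Chars.startswith]
      | cons x xs =>
        by_cases hx : x = ' '
        · subst hx
          simp [PySem.Chars.startswith, List.isPrefixOf]
        · by_cases hxd : x = '.'
          · subst hxd
            simp [PySem.Chars.startswith]
          · simp [PySem.Chars.startswith, List.isPrefixOf, hx, hxd]
            exact fun h => hx h.symm
    · simp only [Bool.not_eq_true] at hall
      rw [hall]
      simp only [Bool.false_and]
      have hne : (cs.takeWhile (· ≠ '.')).dropWhile (fun c => "1234567890".toList.contains c) ≠ [] := by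
        intro h0
        rw [List.dropWhile_eq_nil_iff] at h0
        exact absurd (List.all_eq_true.mpr h0) (by rw [hall]; simp)
      obtain ⟨y, ys, hy⟩ := List.exists_cons_of_ne_nil hne
      have hyd : cs.dropWhile (fun c => "1234567890".toList.contains c) = y :: (ys ++ '.' :: rest) := by
        conv_lhs => rw [hcs]
        rw [List.dropWhile_append, hy]
        simp
      have hyne : y ≠ '.' := by
        have hymem : y ∈ cs.takeWhile (· ≠ '.') :=
          (List.dropWhile_sublist _).subset (hy ▸ List.mem_cons_self)
        simpa using List.mem_takeWhile_imp hymem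
      rw [hyd]
      simp [hyne]

-- the bullet prefix tests agree: startswith vs take-2 comparison
theorem startswith_take2 (cs : List Char) (a b : Char) :
    PySem.Chars.startswith cs [a, b] = (cs.take 2 == [a, b]) := by
  rw [Bool.eq_iff_iff]
  rw [show (PySem.Chars.startswith cs [a, b] = true) ↔ [a, b] <+: cs from PySem.Chars.startswith_iff cs [a, b]]
  rw [List.prefix_iff_eq_take, beq_iff_eq]
  show [a, b] = cs.take 2 ↔ cs.take 2 = [a, b]
  exact eq_comm

-- ===== VERDICT (by name: the statement is the Claim_ definition above) =====
theorem is_list_item_spec : Claim_equal_is_list_item := by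
  intro line _
  unfold Spec_is_list_item is_list_item is_list_item_alt
  simp only [PySem.Str.startswith_eq]
  have hdash : "- ".toList = ['-', ' '] := by decide
  have hstar : "* ".toList = ['*', ' '] := by decide
  have hcond : (PySem.Chars.startswith (PySem.Str.lstrip line).toList "- ".toList
        || PySem.Chars.startswith (PySem.Str.lstrip line).toList "* ".toList)
      = ((PySem.Str.lstrip line).toList.take 2 == ['-', ' ']
        || (PySem.Str.lstrip line).toList.take 2 == ['*', ' ']) := by
    rw [hdash, hstar, startswith_take2, startswith_take2]
  simp only [hcond]
  by_cases hb : ((PySem.Str.lstrip line).toList.take 2 == ['-', ' ']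
      || (PySem.Str.lstrip line).toList.take 2 == ['*', ' ']) = true
  · rw [if_pos hb, if_pos hb]
  · rw [if_neg hb, if_neg hb]
    exact core_eq (PySem.Str.lstrip line).toList
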